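-- pv_equiv track=rewrite | github.com/kdedwards/2020-Advent | Day 16/Day16p1.py | checkTickets
-- ===== SOURCE A (Python) =====
-- def checkTickets(rules, myTicket, nearbyTickets):
--     errorScanningRate = 0
--     for ticket in nearbyTickets:
--         for field in ticket:
--             valid = False
--             for rule in rules:
--                 if (field >= rule[1][0] and field <= rule[1][1]) or (field >= rule[2][0] and field <= rule[2][1]):
--                     valid = True
--             if not valid:
--                 errorScanningRate += field
--     return errorScanningRate
-- ===== SOURCE B (Python) =====
-- def checkTickets(rules, myTicket, nearbyTickets):
--     # Build an index once: all rule ranges, sorted by low end, merged into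
--     # disjoint intervals; then each field is checked against the merged index.
--     intervals = sorted([r[1] for r in rules] + [r[2] for r in rules],
--                        key=lambda iv: iv[0])
--     merged = []
--     for lo, hi in intervals:
--         if merged and lo <= merged[-1][1] + 1:
--             if hi > merged[-1][1]:
--                 merged[-1] = (merged[-1][0], hi)
--         else:
--             merged.append((lo, hi))
--     total = 0
--     for ticket in nearbyTickets:
--         for field in ticket:
--             if not any(lo <= field <= hi for lo, hi in merged):
--                 total += field
--     return total
-- ===== Notes on version B (the rewrite author's own statement) =====
-- stated objective: faster
-- what changed: B flattens the rule ranges once, sorts them by low end and merges them into disjoint intervals, then tests each ticket field against that merged index (with short-circuiting any), instead of A's full rescan of every rule for every field.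
import Mathlib
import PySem

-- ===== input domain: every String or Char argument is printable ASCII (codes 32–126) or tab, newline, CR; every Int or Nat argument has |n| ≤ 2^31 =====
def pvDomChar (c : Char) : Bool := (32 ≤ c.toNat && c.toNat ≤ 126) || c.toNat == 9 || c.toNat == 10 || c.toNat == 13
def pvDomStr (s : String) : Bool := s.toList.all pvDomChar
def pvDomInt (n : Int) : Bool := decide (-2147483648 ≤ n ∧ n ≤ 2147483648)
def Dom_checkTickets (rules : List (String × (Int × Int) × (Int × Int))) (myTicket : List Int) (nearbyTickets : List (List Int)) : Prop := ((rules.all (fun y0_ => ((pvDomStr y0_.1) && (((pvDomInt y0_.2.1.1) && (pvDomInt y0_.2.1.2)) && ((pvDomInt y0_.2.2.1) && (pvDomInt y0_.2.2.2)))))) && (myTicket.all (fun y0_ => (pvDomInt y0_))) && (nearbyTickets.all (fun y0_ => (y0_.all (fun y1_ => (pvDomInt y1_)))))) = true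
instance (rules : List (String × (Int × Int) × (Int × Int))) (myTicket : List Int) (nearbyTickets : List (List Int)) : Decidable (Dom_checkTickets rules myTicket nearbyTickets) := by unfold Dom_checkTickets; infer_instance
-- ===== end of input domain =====

-- B builds a sorted merged-interval index once and probes it per field, instead of A's rescan of all rules per field.

-- ===== PORT A =====
def checkTickets (rules : List (String × (Int × Int) × (Int × Int))) (_myTicket : List Int) (nearbyTickets : List (List Int)) : Int :=
  nearbyTickets.foldl (fun errorScanningRate ticket =>
    ticket.foldl (fun errorScanningRate field =>
      let valid := rules.foldl (fun valid rule =>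
        if (field ≥ rule.2.1.1 ∧ field ≤ rule.2.1.2) ∨ (field ≥ rule.2.2.1 ∧ field ≤ rule.2.2.2)
        then true else valid) false
      if !valid then errorScanningRate + field else errorScanningRate) errorScanningRate) 0

-- ===== PORT B =====
-- merged is kept head-first (Python appends at the back and edits merged[-1]; here the newest interval is the head)
def mergeStep (merged : List (Int × Int)) (iv : Int × Int) : List (Int × Int) :=
  match merged with
  | [] => [iv]
  | (a, b) :: rest =>
      if iv.1 ≤ b + 1 then
        if iv.2 > b then (a, iv.2) :: rest else (a, b) :: rest
      else iv :: (a, b) :: rest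

def checkTickets_alt (rules : List (String × (Int × Int) × (Int × Int))) (_myTicket : List Int) (nearbyTickets : List (List Int)) : Int :=
  let intervals := PySem.List.sorted (rules.map (fun r => r.2.1) ++ rules.map (fun r => r.2.2)) (fun iv => iv.1) false
  let merged := intervals.foldl mergeStep []
  nearbyTickets.foldl (fun total ticket =>
    ticket.foldl (fun total field =>
      if merged.any (fun iv => decide (iv.1 ≤ field) && decide (field ≤ iv.2)) then total
      else total + field) total) 0

-- ===== PRECONDITION & SPEC =====
def Spec_checkTickets (rules : List (String × (Int × Int) × (Int × Int))) (myTicket : List Int) (nearbyTickets : List (List Int)) (out : Int) : Prop := out = checkTickets_alt rules myTicket nearbyTickets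
instance (rules : List (String × (Int × Int) × (Int × Int))) (myTicket : List Int) (nearbyTickets : List (List Int)) (out : Int) : Decidable (Spec_checkTickets rules myTicket nearbyTickets out) := by unfold Spec_checkTickets; infer_instance

-- ===== CLAIM (what is proved, stated in full; the proofs are below) =====
def Claim_equal_checkTickets : Prop := ∀ (rules : List (String × (Int × Int) × (Int × Int))) (myTicket : List Int) (nearbyTickets : List (List Int)), Dom_checkTickets rules myTicket nearbyTickets → Spec_checkTickets rules myTicket nearbyTickets (checkTickets rules myTicket nearbyTickets)

-- ===== LEMMAS AND PROOFS =====

-- a field f lies in some interval of l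
def pvCovered (f : Int) (l : List (Int × Int)) : Prop := ∃ iv ∈ l, iv.1 ≤ f ∧ f ≤ iv.2

lemma foldl_or_valid (f : Int) (rules : List (String × (Int × Int) × (Int × Int))) :
    ∀ b : Bool, rules.foldl (fun valid rule =>
        if (f ≥ rule.2.1.1 ∧ f ≤ rule.2.1.2) ∨ (f ≥ rule.2.2.1 ∧ f ≤ rule.2.2.2)
        then true else valid) b
      = (b || rules.any (fun rule => decide ((f ≥ rule.2.1.1 ∧ f ≤ rule.2.1.2) ∨ (f ≥ rule.2.2.1 ∧ f ≤ rule.2.2.2)))) := by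
  induction rules with
  | nil => simp
  | cons r t ih =>
      intro b
      simp only [List.foldl_cons, List.any_cons]
      rw [ih]
      by_cases h : (f ≥ r.2.1.1 ∧ f ≤ r.2.1.2) ∨ (f ≥ r.2.2.1 ∧ f ≤ r.2.2.2)
      · simp [h]
      · simp [h]

lemma mergeStep_covered (f : Int) (acc : List (Int × Int)) (iv : Int × Int)
    (h : ∀ hd, acc.head? = some hd → hd.1 ≤ iv.1) :
    pvCovered f (mergeStep acc iv) ↔ pvCovered f acc ∨ (iv.1 ≤ f ∧ f ≤ iv.2) := by
  obtain ⟨lo, hi⟩ := iv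
  cases acc with
  | nil => simp [mergeStep, pvCovered]
  | cons hd rest =>
      obtain ⟨a, b⟩ := hd
      have ha : a ≤ lo := h (a, b) rfl
      by_cases h1 : lo ≤ b + 1
      · by_cases h2 : hi > b
        · simp only [mergeStep, if_pos h1, if_pos h2, pvCovered, List.mem_cons]
          constructor
          · rintro ⟨j, (rfl | hj), hp⟩
            · rcases (by omega : (a ≤ f ∧ f ≤ b) ∨ (lo ≤ f ∧ f ≤ hi)) with hc | hc
              · exact Or.inl ⟨(a, b), Or.inl rfl, hc⟩
              · exact Or.inr hc
            · exact Or.inl ⟨j, Or.inr hj, hp⟩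
          · rintro (⟨j, (rfl | hj), hp⟩ | hp)
            · exact ⟨(a, hi), Or.inl rfl, by simp at hp ⊢; omega⟩
            · exact ⟨j, Or.inr hj, hp⟩
            · exact ⟨(a, hi), Or.inl rfl, by simp at hp ⊢; omega⟩
        · simp only [mergeStep, if_pos h1, if_neg h2, pvCovered, List.mem_cons]
          constructor
          · exact fun hp => Or.inl hp
          · rintro (hp | hp)
            · exact hp
            · exact ⟨(a, b), Or.inl rfl, by simp at hp ⊢; omega⟩
      · simp only [mergeStep, if_neg h1, pvCovered, List.mem_cons]
        constructor
        · rintro ⟨j, (rfl | hj), hp⟩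
          · exact Or.inr (by simpa using hp)
          · exact Or.inl ⟨j, hj, hp⟩
        · rintro (⟨j, hj, hp⟩ | hp)
          · exact ⟨j, Or.inr hj, hp⟩
          · exact ⟨(lo, hi), Or.inl rfl, by simpa using hp⟩

lemma head_mergeStep (acc : List (Int × Int)) (iv : Int × Int) :
    ∀ hd, (mergeStep acc iv).head? = some hd →
      hd.1 = iv.1 ∨ (∃ h0, acc.head? = some h0 ∧ hd.1 = h0.1) := by
  cases acc with
  | nil => simp [mergeStep]
  | cons x rest =>
      obtain ⟨a, b⟩ := x
      intro hd
      simp only [mergeStep]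
      split_ifs <;> simp <;> intro h <;> simp [← h]

lemma mergeFold_covered (f : Int) :
    ∀ (l acc : List (Int × Int)), l.Pairwise (fun p q => p.1 ≤ q.1) →
      (∀ j ∈ l, ∀ hd, acc.head? = some hd → hd.1 ≤ j.1) →
      (pvCovered f (l.foldl mergeStep acc) ↔ pvCovered f acc ∨ pvCovered f l) := by
  intro l
  induction l with
  | nil => intro acc _ _; simp [pvCovered]
  | cons iv t ih =>
      intro acc hp hinv
      rw [List.pairwise_cons] at hp
      have hstep := mergeStep_covered f acc iv (hinv iv (List.mem_cons_self))
      have hinv' : ∀ j ∈ t, ∀ hd, (mergeStep acc iv).head? = some hd → hd.1 ≤ j.1 := by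
        intro j hj hd hhd
        rcases head_mergeStep acc iv hd hhd with h | ⟨h0, hh0, heq⟩
        · rw [h]; exact hp.1 j hj
        · rw [heq]
          exact le_trans (hinv iv (List.mem_cons_self) h0 hh0) (hp.1 j hj)
      rw [List.foldl_cons, ih (mergeStep acc iv) hp.2 hinv', hstep]
      simp only [pvCovered, List.mem_cons]
      constructor
      · rintro ((hc | hc) | ⟨j, hj, hpj⟩)
        · exact Or.inl hc
        · exact Or.inr ⟨iv, Or.inl rfl, hc⟩
        · exact Or.inr ⟨j, Or.inr hj, hpj⟩
      · rintro (hc | ⟨j, (rfl | hj), hpj⟩)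
        · exact Or.inl (Or.inl hc)
        · exact Or.inl (Or.inr hpj)
        · exact Or.inr ⟨j, hj, hpj⟩

lemma merged_any_eq (f : Int) (rules : List (String × (Int × Int) × (Int × Int))) :
    (((PySem.List.sorted (rules.map (fun r => r.2.1) ++ rules.map (fun r => r.2.2)) (fun iv => iv.1) false).foldl mergeStep []).any
        (fun iv => decide (iv.1 ≤ f) && decide (f ≤ iv.2)))
      = rules.any (fun rule => decide ((f ≥ rule.2.1.1 ∧ f ≤ rule.2.1.2) ∨ (f ≥ rule.2.2.1 ∧ f ≤ rule.2.2.2))) := by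
  rw [Bool.eq_iff_iff]
  simp only [List.any_eq_true, Bool.and_eq_true, decide_eq_true_eq]
  have hsorted := PySem.List.sorted_pairwise
    (xs := rules.map (fun r => r.2.1) ++ rules.map (fun r => r.2.2)) (key := fun iv => iv.1)
  have hmf := mergeFold_covered f
    (PySem.List.sorted (rules.map (fun r => r.2.1) ++ rules.map (fun r => r.2.2)) (fun iv => iv.1) false)
    [] hsorted (by intro j _ hd h; simp at h)
  have : (∃ iv ∈ ((PySem.List.sorted (rules.map (fun r => r.2.1) ++ rules.map (fun r => r.2.2)) (fun iv => iv.1) false).foldl mergeStep []), iv.1 ≤ f ∧ f ≤ iv.2)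
      ↔ pvCovered f ((PySem.List.sorted (rules.map (fun r => r.2.1) ++ rules.map (fun r => r.2.2)) (fun iv => iv.1) false).foldl mergeStep []) := Iff.rfl
  rw [this, hmf]
  simp only [pvCovered, PySem.List.mem_sorted, List.mem_append, List.mem_map, ge_iff_le]
  constructor
  · rintro (⟨j, hj, _⟩ | ⟨iv, (⟨r, hr, rfl⟩ | ⟨r, hr, rfl⟩), hp⟩)
    · simp at hj
    · exact ⟨r, hr, Or.inl hp⟩
    · exact ⟨r, hr, Or.inr hp⟩
  · rintro ⟨r, hr, (hp | hp)⟩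
    · exact Or.inr ⟨r.2.1, Or.inl ⟨r, hr, rfl⟩, hp⟩
    · exact Or.inr ⟨r.2.2, Or.inr ⟨r, hr, rfl⟩, hp⟩

-- ===== VERDICT (by name: the statement is the Claim_ definition above) =====
theorem checkTickets_spec : Claim_equal_checkTickets := by
  intro rules myTicket nearbyTickets _
  unfold Spec_checkTickets checkTickets checkTickets_alt
  have hfun : ∀ (total : Int) (field : Int),
      (let valid := rules.foldl (fun valid rule =>
        if (field ≥ rule.2.1.1 ∧ field ≤ rule.2.1.2) ∨ (field ≥ rule.2.2.1 ∧ field ≤ rule.2.2.2)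
        then true else valid) false
       if !valid then total + field else total)
      = (if ((PySem.List.sorted (rules.map (fun r => r.2.1) ++ rules.map (fun r => r.2.2)) (fun iv => iv.1) false).foldl mergeStep []).any
             (fun iv => decide (iv.1 ≤ field) && decide (field ≤ iv.2)) then total
         else total + field) := by
    intro total field
    simp only [foldl_or_valid field rules, Bool.false_or, merged_any_eq field rules]
    cases h : rules.any (fun rule => decide ((field ≥ rule.2.1.1 ∧ field ≤ rule.2.1.2) ∨ (field ≥ rule.2.2.1 ∧ field ≤ rule.2.2.2))) <;> simp
  simp only [hfun]
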